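-- pv_equiv track=rewrite | github.com/travistheall/genie | src/genie.py | get_name_repl
-- ===== SOURCE A (Python) =====
-- def get_name_repl(col: str) -> str:
--     name_repls = {
--         " ": "_",
--         "/": "_",
--         "%": "per",
--         "#": "num",
--     }
--     new_col = col
--     for _old, _new in name_repls.items():
--         new_col = new_col.replace(_old, _new)
--     new_col = new_col.lower()
--     return new_col
-- ===== SOURCE B (Python) =====
-- def get_name_repl(col: str) -> str:
--     name_repls = {
--         " ": "_",
--         "/": "_",
--         "%": "per",
--         "#": "num",
--     }
--     return "".join(name_repls.get(c, c) for c in col).lower()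
-- ===== Notes on version B (the rewrite author's own statement) =====
-- stated objective: simpler
-- what changed: Replaces A's four chained full-string replace() scans by a single pass over the characters of col, emitting name_repls.get(c, c) per character and lowering the joined result once; valid because no replacement output contains any replacement key.
import Mathlib
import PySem

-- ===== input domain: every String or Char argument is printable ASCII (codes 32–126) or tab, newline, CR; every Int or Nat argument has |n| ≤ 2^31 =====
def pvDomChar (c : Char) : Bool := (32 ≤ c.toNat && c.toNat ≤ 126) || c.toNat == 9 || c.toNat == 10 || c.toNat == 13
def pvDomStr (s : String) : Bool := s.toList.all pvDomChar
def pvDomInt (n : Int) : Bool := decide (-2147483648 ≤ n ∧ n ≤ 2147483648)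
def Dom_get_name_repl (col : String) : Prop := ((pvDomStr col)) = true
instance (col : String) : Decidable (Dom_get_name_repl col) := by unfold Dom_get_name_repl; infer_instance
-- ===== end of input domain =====

-- B builds the normalized name in one pass over the characters (per-char table lookup
-- joined, then lowered once) instead of A's four chained full-string replace() scans: simpler.


-- the 4-entry replacement dict, shared verbatim by both Pythons
def pvReps : PySem.Dict String String :=
  PySem.Dict.ofList [(" ", "_"), ("/", "_"), ("%", "per"), ("#", "num")]

-- ===== PORT A =====
-- new_col = col; for _old, _new in name_repls.items(): new_col = new_col.replace(_old, _new); return new_col.lower()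
def get_name_repl (col : String) : String :=
  PySem.Str.lower (pvReps.items.foldl (fun nc p => PySem.Str.replace nc p.1 p.2) col)

-- ===== PORT B =====
-- return "".join(name_repls.get(c, c) for c in col).lower()
def get_name_repl_alt (col : String) : String :=
  PySem.Str.lower (PySem.Str.join ""
    (col.toList.map (fun c => pvReps.getD (String.ofList [c]) (String.ofList [c]))))

-- ===== PRECONDITION & SPEC =====
def Spec_get_name_repl (col : String) (out : String) : Prop := out = get_name_repl_alt col
instance (col : String) (out : String) : Decidable (Spec_get_name_repl col out) := by unfold Spec_get_name_repl; infer_instance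

-- ===== CLAIM (what is proved, stated in full; the proofs are below) =====
def Claim_equal_get_name_repl : Prop := ∀ (col : String), Dom_get_name_repl col → Spec_get_name_repl col (get_name_repl col)

-- ===== LEMMAS AND PROOFS =====

-- replace with a single-character pattern acts independently on each character
theorem pv_go_single (o : Char) (w : List Char) :
    ∀ (l acc : List Char),
      PySem.Chars.replace.go [o] w l.length l acc
        = acc.reverse ++ l.flatMap (fun c => if c = o then w else [c]) := by
  intro l
  induction l with
  | nil => intro acc; simp [PySem.Chars.replace.go]
  | cons c t ih =>
    intro acc
    rw [List.length_cons, PySem.Chars.replace.go]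
    by_cases h : c = o
    · subst h
      simp [List.isPrefixOf, ih]
    · have hp : List.isPrefixOf [o] (c :: t) = false := by
        simp [List.isPrefixOf]
        intro hco; exact absurd hco.symm h
      simp [hp, ih, h]

theorem pv_replace_single (o : Char) (w s : List Char) :
    PySem.Chars.replace s [o] w = s.flatMap (fun c => if c = o then w else [c]) := by
  simp [PySem.Chars.replace, pv_go_single]

-- the combined per-character substitution
def pvF (c : Char) : List Char :=
  if c = ' ' then ['_'] else if c = '/' then ['_']
  else if c = '%' then ['p','e','r'] else if c = '#' then ['n','u','m'] else [c]

theorem pv_chain (s : List Char) :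
    ((((s.flatMap (fun c => if c = ' ' then ['_'] else [c])).flatMap
        (fun c => if c = '/' then ['_'] else [c])).flatMap
        (fun c => if c = '%' then ['p','e','r'] else [c])).flatMap
        (fun c => if c = '#' then ['n','u','m'] else [c]))
      = s.flatMap pvF := by
  induction s with
  | nil => rfl
  | cons c t ih =>
    simp only [List.flatMap_cons, List.flatMap_append] at *
    rw [ih]
    by_cases h1 : c = ' '
    · subst h1; rfl
    · by_cases h2 : c = '/'
      · subst h2; rfl
      · by_cases h3 : c = '%'
        · subst h3; rfl
        · by_cases h4 : c = '#'
          · subst h4; rfl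
          · simp [pvF, h1, h2, h3, h4]

-- joining on the empty separator is flattening
theorem pv_join_flatten (l : List (List Char)) :
    PySem.Chars.join [] l = l.flatten := by
  induction l with
  | nil => rfl
  | cons x t ih =>
    cases t with
    | nil => simp [PySem.Chars.join, List.intercalate]
    | cons y u =>
      simp only [PySem.Chars.join, List.intercalate] at *
      simp [List.intersperse, List.flatten] at *
      simpa using ih

-- B's per-character dict lookup computes pvF
theorem pv_lookup (c : Char) :
    (pvReps.getD (String.ofList [c]) (String.ofList [c])).toList = pvF c := by
  by_cases h1 : c = ' '
  · subst h1; rfl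
  · by_cases h2 : c = '/'
    · subst h2; rfl
    · by_cases h3 : c = '%'
      · subst h3; rfl
      · by_cases h4 : c = '#'
        · subst h4; rfl
        · have e1 : (" " == String.ofList [c]) = false := by
            simp [String.ext_iff]; intro h; exact absurd h.symm h1
          have e2 : ("/" == String.ofList [c]) = false := by
            simp [String.ext_iff]; intro h; exact absurd h.symm h2
          have e3 : ("%" == String.ofList [c]) = false := by
            simp [String.ext_iff]; intro h; exact absurd h.symm h3
          have e4 : ("#" == String.ofList [c]) = false := by
            simp [String.ext_iff]; intro h; exact absurd h.symm h4
          have hm : pvReps = PySem.Dict.mk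
              [(" ", "_"), ("/", "_"), ("%", "per"), ("#", "num")] := rfl
          rw [hm]
          simp [PySem.Dict.getD, e1, e2, e3, e4,
                pvF, h1, h2, h3, h4, PySem.Dict.get?]

-- ===== VERDICT (by name: the statement is the Claim_ definition above) =====
theorem get_name_repl_spec : Claim_equal_get_name_repl := by
  intro col _
  unfold Spec_get_name_repl get_name_repl get_name_repl_alt
  apply congrArg
  apply String.ext
  show (PySem.Str.replace (PySem.Str.replace (PySem.Str.replace (PySem.Str.replace col " " "_") "/" "_") "%" "per") "#" "num").toList = _
  simp only [PySem.Str.replace, PySem.Str.join, String.toList_ofList]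
  rw [show (" " : String).toList = [' '] from rfl, show ("_" : String).toList = ['_'] from rfl,
      show ("/" : String).toList = ['/'] from rfl, show ("%" : String).toList = ['%'] from rfl,
      show ("per" : String).toList = ['p','e','r'] from rfl,
      show ("#" : String).toList = ['#'] from rfl,
      show ("num" : String).toList = ['n','u','m'] from rfl]
  rw [pv_replace_single, pv_replace_single, pv_replace_single, pv_replace_single, pv_chain,
      show ("" : String).toList = ([] : List Char) from rfl, pv_join_flatten]
  simp [List.flatMap, Function.comp_def, pv_lookup]
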